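-- pv_equiv track=rewrite | github.com/MohammedGuniem/social-media-influence-analyzer | Master-Thesis-Project/neural_network_3.py | find_common_words
-- ===== SOURCE A (Python) =====
-- def find_common_words(lists):
--     common = []
--     for i in range(0, len(lists), 1):
--         rest = []
--         for l in lists[i+1:len(lists)]:
--             rest += l
--         current_common = list(set(lists[i]) & set(rest))
--         common += current_common
--     return list(set(common))
-- ===== SOURCE B (Python) =====
-- def find_common_words(lists):
--     # Count, for each word, in how many of the sublists it occurs (one pass,
--     # deduplicating each sublist), then emit the words with count >= 2 in
--     # first-occurrence order over the flattened input.
--     count = {}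
--     for l in lists:
--         for w in dict.fromkeys(l):
--             count[w] = count.get(w, 0) + 1
--     order = dict.fromkeys(w for l in lists for w in l)
--     return [w for w in order if count.get(w, 0) >= 2]
-- ===== Notes on version B (the rewrite author's own statement) =====
-- stated objective: faster
-- what changed: A repeatedly concatenates all later sublists and intersects sets for every index (quadratic rescanning); B makes one counting pass over the per-sublist-deduplicated words and then filters the deduplicated flattened input for words occurring in at least two sublists.
import Mathlib
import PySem

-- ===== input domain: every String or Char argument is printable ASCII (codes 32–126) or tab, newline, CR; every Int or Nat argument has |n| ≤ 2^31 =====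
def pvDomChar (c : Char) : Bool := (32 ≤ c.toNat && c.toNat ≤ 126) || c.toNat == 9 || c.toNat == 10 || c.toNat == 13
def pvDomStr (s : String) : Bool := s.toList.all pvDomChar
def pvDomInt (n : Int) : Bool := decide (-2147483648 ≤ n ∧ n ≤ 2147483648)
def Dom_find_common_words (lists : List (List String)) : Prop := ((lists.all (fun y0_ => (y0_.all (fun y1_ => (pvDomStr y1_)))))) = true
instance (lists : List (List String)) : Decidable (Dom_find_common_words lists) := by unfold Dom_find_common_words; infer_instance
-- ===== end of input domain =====

-- B replaces A's quadratic per-index "intersect with the concatenation of all later lists" scans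
-- by one counting pass (in how many sublists does each word occur) plus a filtered dedup of the
-- flattened input (objective: faster). Both Pythons return list(set(...))-style results compared
-- as sets; the ports fix the insertion-order reading of that set.

-- ===== PORT A =====
def find_common_words (lists : List (List String)) : List String :=
  let common := (PySem.List.pyRange 0 (lists.length : Int) 1).foldl (fun common i =>
    let rest := (PySem.List.slice lists (some (i+1)) (some (lists.length : Int))).foldl
      (fun rest l => rest ++ l) []
    let current_common := PySem.Set.inter (PySem.Set.ofList (PySem.List.pyGetD lists i []))
      (PySem.Set.ofList rest)
    common ++ current_common) []
  PySem.Set.ofList common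


-- ===== PORT B =====
def find_common_words_alt (lists : List (List String)) : List String :=
  let count := lists.foldl (fun d l =>
    (PySem.List.dedup l).foldl (fun d w => d.insert w (d.getD w 0 + 1)) d)
    (PySem.Dict.empty : PySem.Dict String Int)
  let order := PySem.List.dedup (lists.flatMap (fun l => l))
  order.filter (fun w => decide ((2:Int) ≤ count.getD w 0))


-- ===== PRECONDITION & SPEC =====
def Spec_find_common_words (lists : List (List String)) (out : List String) : Prop := out = find_common_words_alt lists
instance (lists : List (List String)) (out : List String) : Decidable (Spec_find_common_words lists out) := by unfold Spec_find_common_words; infer_instance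

-- ===== CLAIM (what is proved, stated in full; the proofs are below) =====
def Claim_equal_find_common_words : Prop := ∀ (lists : List (List String)), Dom_find_common_words lists → Spec_find_common_words lists (find_common_words lists)

-- ===== LEMMAS AND PROOFS =====
def goA : List (List String) → List String
  | [] => []
  | l :: ls =>
      PySem.Set.inter (PySem.Set.ofList l) (PySem.Set.ofList (ls.flatMap (fun x => x))) ++ goA ls

lemma count_getD (lists : List (List String)) (d : PySem.Dict String Int) (w : String) :
    (lists.foldl (fun d l =>
      (PySem.Set.ofList l).foldl (fun d w => d.insert w (d.getD w 0 + 1)) d) d).getD w 0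
    = d.getD w 0 + (lists.countP (fun l => decide (w ∈ l)) : Int) := by
  induction lists generalizing d with
  | nil => simp
  | cons l ls ih =>
      rw [List.foldl_cons, ih, PySem.Dict.getD_foldl_insert_add_one, List.countP_cons]
      have h : (PySem.Set.ofList l).count w = if w ∈ l then 1 else 0 := by
        by_cases hw : w ∈ l
        · rw [if_pos hw]
          exact List.count_eq_one_of_mem (PySem.Set.nodup_ofList l) (by simpa [PySem.Set.mem_ofList] using hw)
        · rw [if_neg hw, List.count_eq_zero]
          intro hm; exact hw (by simpa [PySem.Set.mem_ofList] using hm)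
      rw [h]
      by_cases hw : w ∈ l
      · simp only [hw, if_true, decide_true]; push_cast; ring
      · simp [hw]

lemma range_flatMap_goA (ls : List (List String)) :
    (List.range ls.length).flatMap (fun k =>
      PySem.Set.inter (PySem.Set.ofList (ls.getD k []))
        (PySem.Set.ofList ((ls.drop (k+1)).flatMap (fun x => x)))) = goA ls := by
  induction ls with
  | nil => simp [goA]
  | cons l ls ih =>
      rw [List.length_cons, List.range_succ_eq_map, List.flatMap_cons, List.flatMap_map]
      simp only [List.getD_cons_zero, List.drop_succ_cons, List.getD_cons_succ, List.drop_zero]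
      rw [goA, ih]

lemma find_common_words_eq_goA (lists : List (List String)) :
    find_common_words lists = PySem.Set.ofList (goA lists) := by
  unfold find_common_words
  have hrest : ∀ i : Int, (PySem.List.slice lists (some (i+1)) (some (lists.length : Int))).foldl
      (fun rest l => rest ++ l) [] = (PySem.List.slice lists (some (i+1)) (some (lists.length : Int))).flatMap (fun l => l) := by
    intro i
    simpa using PySem.List.foldl_append_eq_flatMap (fun l => l)
      (PySem.List.slice lists (some (i+1)) (some (lists.length : Int))) []
  simp only [hrest]
  rw [show ((PySem.List.pyRange 0 (lists.length : Int) 1).foldl (fun common i =>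
        common ++ (PySem.Set.inter (PySem.Set.ofList (PySem.List.pyGetD lists i []))
          (PySem.Set.ofList ((PySem.List.slice lists (some (i+1)) (some (lists.length : Int))).flatMap (fun l => l))))) [])
      = [] ++ (PySem.List.pyRange 0 (lists.length : Int) 1).flatMap (fun i =>
          PySem.Set.inter (PySem.Set.ofList (PySem.List.pyGetD lists i []))
            (PySem.Set.ofList ((PySem.List.slice lists (some (i+1)) (some (lists.length : Int))).flatMap (fun l => l))))
      from PySem.List.foldl_append_eq_flatMap _ _ _]
  rw [List.nil_append, PySem.List.pyRange_one, List.flatMap_map]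
  rw [← range_flatMap_goA lists]
  refine congrArg _ (List.flatMap_congr ?_)
  intro k hk
  rw [List.mem_range] at hk
  have h1 : (0 : Int) + (k : Int) = ((k : Nat) : Int) := by ring
  rw [h1, PySem.List.pyGetD_natCast]
  have h2 : ((k : Nat) : Int) + 1 = (((k+1 : Nat)) : Int) := by push_cast; ring
  rw [h2, PySem.List.slice_natCast, List.take_of_length_le (by rw [List.length_drop])]

lemma main_goA (ls : List (List String)) :
    PySem.Set.ofList (goA ls) =
      (PySem.Set.ofList (ls.flatMap (fun x => x))).filter
        (fun w => decide (2 ≤ ls.countP (fun l => decide (w ∈ l)))) := by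
  induction ls with
  | nil => simp [goA]
  | cons l ls ih =>
      rw [goA, PySem.Set.ofList_append, PySem.Set.update_eq_append_filter,
        PySem.Set.ofList_eq_self_of_nodup _ (PySem.Set.nodup_inter _ _ (PySem.Set.nodup_ofList l)),
        List.flatMap_cons, PySem.Set.ofList_append, PySem.Set.update_eq_append_filter,
        List.filter_append, List.filter_filter]
      congr 1
      · -- inter = filter p (ofList l)
        show PySem.Set.inter (PySem.Set.ofList l) (PySem.Set.ofList (ls.flatMap (fun x => x)))
          = (PySem.Set.ofList l).filter _
        rw [show PySem.Set.inter (PySem.Set.ofList l) (PySem.Set.ofList (ls.flatMap (fun x => x)))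
            = (PySem.Set.ofList l).filter (fun x => PySem.Set.contains (PySem.Set.ofList (ls.flatMap (fun x => x))) x) from rfl]
        apply List.filter_congr
        intro w hw
        rw [PySem.Set.mem_ofList] at hw
        rw [Bool.eq_iff_iff, PySem.Set.contains_iff, PySem.Set.mem_ofList, decide_eq_true_iff,
          List.countP_cons_of_pos (by simpa using hw), List.mem_flatMap]
        have hcount : (0 < ls.countP (fun l => decide (w ∈ l))) ↔ ∃ a ∈ ls, w ∈ a := by
          rw [List.countP_pos_iff]; simp
        constructor
        · rintro ⟨a, ha, hwa⟩
          have := hcount.2 ⟨a, ha, hwa⟩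
          omega
        · intro h2
          exact hcount.1 (by omega)
      · rw [ih, List.filter_filter]
        apply List.filter_congr
        intro w hw
        rw [PySem.Set.mem_ofList] at hw
        by_cases hwl : w ∈ l
        · have h1 : PySem.Set.contains (PySem.Set.inter (PySem.Set.ofList l) (PySem.Set.ofList (ls.flatMap (fun x => x)))) w = true := by
            rw [PySem.Set.contains_iff, PySem.Set.mem_inter, PySem.Set.mem_ofList, PySem.Set.mem_ofList]
            exact ⟨hwl, hw⟩
          have h2 : PySem.Set.contains (PySem.Set.ofList l) w = true := by
            rw [PySem.Set.contains_iff, PySem.Set.mem_ofList]; exact hwl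
          rw [h1, h2]; simp
        · have h1 : PySem.Set.contains (PySem.Set.inter (PySem.Set.ofList l) (PySem.Set.ofList (ls.flatMap (fun x => x)))) w = false := by
            rw [Bool.eq_false_iff]; intro hc
            rw [PySem.Set.contains_iff, PySem.Set.mem_inter, PySem.Set.mem_ofList] at hc
            exact hwl hc.1
          have h2 : PySem.Set.contains (PySem.Set.ofList l) w = false := by
            rw [Bool.eq_false_iff]; intro hc
            rw [PySem.Set.contains_iff, PySem.Set.mem_ofList] at hc
            exact hwl hc
          rw [h1, h2]
          rw [List.countP_cons]
          simp [hwl]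
lemma fcw_equal (lists : List (List String)) : find_common_words lists = find_common_words_alt lists := by
  rw [find_common_words_eq_goA, main_goA]
  unfold find_common_words_alt
  simp only [PySem.List.dedup_eq_ofList]
  apply List.filter_congr
  intro w _
  simp only [count_getD]
  simp only [PySem.Dict.getD_empty]
  rw [Bool.eq_iff_iff, decide_eq_true_iff, decide_eq_true_iff]
  omega

-- ===== VERDICT (by name: the statement is the Claim_ definition above) =====
theorem find_common_words_spec : Claim_equal_find_common_words := by
  intro lists _
  unfold Spec_find_common_words
  exact fcw_equal lists
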